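-- pv_equiv track=rewrite | github.com/tijko/Project-Euler | Python/py_solutions_11-20/Euler_19.py | euler_19
-- ===== SOURCE A (Python) =====
-- from itertools import cycle
--
-- def euler_19(start, stop):
--     leap_yr = range(1, 30)
--     weekday = cycle(range(7))
--     for i in range(start, stop):
--         Feb = range(1, 29) if i % 4 != 0 else leap_yr
--         Jan = Mar = May = Jul = Aug = Oct = Dec = range(1, 32)
--         Apr = Jun = Sep = Nov = range(1, 31)
--         year = [Jan, Feb, Mar, Apr, May, Jun, Jul, Aug, Sep, Oct, Nov, Dec]
--         yield sum([1 for mos in range(12) if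
--                    list(zip(year[mos], weekday))[0] == (1, 6)])
-- ===== SOURCE B (Python) =====
-- # Per-year O(1) table lookup: precomputed month-start-on-weekday-6 counts per
-- # (start-offset mod 7, leap), advancing the offset by year_length mod 7.
-- _NONLEAP = (2, 2, 1, 3, 1, 1, 2)
-- _LEAP = (2, 1, 2, 2, 1, 1, 3)
--
-- def euler_19(start, stop):
--     w = 0
--     for y in range(start, stop):
--         if y % 4 == 0:
--             yield _LEAP[w]
--             w = (w + 2) % 7
--         else:
--             yield _NONLEAP[w]
--             w = (w + 1) % 7
-- ===== Notes on version B (the rewrite author's own statement) =====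
-- stated objective: faster
-- what changed: Replaces per-year zipping of full day ranges against a weekday cycle by an O(1)-per-year lookup in a precomputed 7-entry table (per leap/non-leap), advancing the start-offset by year_length mod 7.
import Mathlib
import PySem

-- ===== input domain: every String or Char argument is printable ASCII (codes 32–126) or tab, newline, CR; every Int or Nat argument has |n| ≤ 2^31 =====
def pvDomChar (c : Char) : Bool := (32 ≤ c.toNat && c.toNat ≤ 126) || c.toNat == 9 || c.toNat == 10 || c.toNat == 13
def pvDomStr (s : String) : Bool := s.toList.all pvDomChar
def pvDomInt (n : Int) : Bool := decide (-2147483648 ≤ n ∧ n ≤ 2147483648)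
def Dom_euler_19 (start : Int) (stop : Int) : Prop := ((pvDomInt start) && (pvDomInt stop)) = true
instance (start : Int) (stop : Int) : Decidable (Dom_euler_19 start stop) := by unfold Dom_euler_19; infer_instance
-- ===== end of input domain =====

-- B replaces A's per-day zipping against a weekday cycle by a precomputed
-- 7-entry count table per (start offset, leap); constant-factor speed-up.

-- ===== PORT A =====
-- the weekday `cycle(range(7))` iterator is represented by its position mod 7;
-- `list(zip(year[mos], weekday))` is the literal zipped pair list, consuming
-- len(month) elements of the cycle, and the comprehension checks its head == (1, 6)
def pvYearA (i : Int) (w : Nat) : Int × Nat :=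
  let feb : Nat := if PySem.Int.mod i 4 ≠ 0 then 28 else 29
  let year : List Nat := [31, feb, 31, 30, 31, 30, 31, 31, 30, 31, 30, 31]
  year.foldl (fun (st : Int × Nat) len =>
    let pairs : List (Int × Nat) :=
      (List.range len).map (fun (k : Nat) => ((1 + (k : Int)), ((st.2 + k) % 7 : Nat)))
    (st.1 + (if pairs.head? = some (1, 6) then 1 else 0), (st.2 + len) % 7)) (0, w)

def euler_19 (start : Int) (stop : Int) : List Int :=
  ((PySem.List.pyRange start stop 1).foldl
    (fun (st : List Int × Nat) i =>
      let r := pvYearA i st.2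
      (st.1 ++ [r.1], r.2)) ([], 0)).1

-- ===== PORT B =====
def pvNonLeapTab : List Int := [2, 2, 1, 3, 1, 1, 2]
def pvLeapTab : List Int := [2, 1, 2, 2, 1, 1, 3]

def euler_19_alt (start : Int) (stop : Int) : List Int :=
  ((PySem.List.pyRange start stop 1).foldl
    (fun (st : List Int × Nat) y =>
      if PySem.Int.mod y 4 = 0 then (st.1 ++ [pvLeapTab.getD st.2 0], (st.2 + 2) % 7)
      else (st.1 ++ [pvNonLeapTab.getD st.2 0], (st.2 + 1) % 7)) ([], 0)).1

-- ===== PRECONDITION & SPEC =====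
def Spec_euler_19 (start : Int) (stop : Int) (out : List Int) : Prop := out = euler_19_alt start stop
instance (start : Int) (stop : Int) (out : List Int) : Decidable (Spec_euler_19 start stop out) := by unfold Spec_euler_19; infer_instance

-- ===== CLAIM (what is proved, stated in full; the proofs are below) =====
def Claim_equal_euler_19 : Prop := ∀ (start : Int) (stop : Int), Dom_euler_19 start stop → Spec_euler_19 start stop (euler_19 start stop)

-- ===== LEMMAS AND PROOFS =====

-- one year: A's zip-based count and cycle consumption equal B's table lookup and offset step
lemma pvYearA_eq (i : Int) (w : Nat) (hw : w < 7) :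
    pvYearA i w =
      (if PySem.Int.mod i 4 = 0 then (pvLeapTab.getD w 0, (w + 2) % 7)
       else (pvNonLeapTab.getD w 0, (w + 1) % 7)) := by
  by_cases h : (4 : Int) ∣ i <;>
    simp [pvYearA, h] <;> interval_cases w <;> decide

lemma pvLoop_eq : ∀ (ys : List Int) (acc : List Int) (w : Nat), w < 7 →
    (ys.foldl (fun (st : List Int × Nat) i =>
        let r := pvYearA i st.2
        (st.1 ++ [r.1], r.2)) (acc, w)) =
    (ys.foldl (fun (st : List Int × Nat) y =>
        if PySem.Int.mod y 4 = 0 then (st.1 ++ [pvLeapTab.getD st.2 0], (st.2 + 2) % 7)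
        else (st.1 ++ [pvNonLeapTab.getD st.2 0], (st.2 + 1) % 7)) (acc, w)) := by
  intro ys
  induction ys with
  | nil => intro acc w hw; rfl
  | cons y ys ih =>
      intro acc w hw
      simp only [List.foldl_cons, pvYearA_eq y w hw]
      by_cases h : PySem.Int.mod y 4 = 0
      · simp only [h, if_true]
        exact ih _ _ (Nat.mod_lt _ (by norm_num))
      · simp only [h, if_false]
        exact ih _ _ (Nat.mod_lt _ (by norm_num))

-- ===== VERDICT (by name: the statement is the Claim_ definition above) =====
theorem euler_19_spec : Claim_equal_euler_19 := by
  intro start stop _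
  unfold Spec_euler_19 euler_19 euler_19_alt
  rw [pvLoop_eq _ [] 0 (by norm_num)]
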